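-- pv_equiv track=rewrite | github.com/hutchybop/reelclean | check_low_quality_videos.py | classify_resolution
-- ===== SOURCE A (Python) =====
-- RESOLUTION_TIERS = {
--     "SD": 0,
--     "720p": 1280,
--     "1080p": 1920,
--     "4K": 3840,
-- }
--
-- def classify_resolution(width):
--     if not width:
--         return "Unknown"
--
--     for tier, min_width in sorted(
--         RESOLUTION_TIERS.items(), key=lambda x: x[1], reverse=True
--     ):
--         if width >= min_width:
--             return tier
--
--     return "SD"
-- ===== SOURCE B (Python) =====
-- THRESHOLDS = [1280, 1920, 3840]          # ascending lower bounds of 720p, 1080p, 4K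
-- NAMES = ["SD", "720p", "1080p", "4K"]    # NAMES[i] is the tier for bisect index i
--
-- def classify_resolution(width):
--     # Binary search (bisect_right) over the ascending threshold table,
--     # then index into the name table; no sort, no linear scan.
--     if not width:
--         return "Unknown"
--     lo, hi = 0, len(THRESHOLDS)
--     while lo < hi:
--         mid = (lo + hi) // 2
--         if width < THRESHOLDS[mid]:
--             hi = mid
--         else:
--             lo = mid + 1
--     return NAMES[lo]
-- ===== Notes on version B (the rewrite author's own statement) =====
-- stated objective: alternative
-- what changed: Replaces A's runtime sort plus descending linear scan of the tier dict with a hand-written bisect_right binary search over an ascending threshold list followed by an index into a name table.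
import Mathlib
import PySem

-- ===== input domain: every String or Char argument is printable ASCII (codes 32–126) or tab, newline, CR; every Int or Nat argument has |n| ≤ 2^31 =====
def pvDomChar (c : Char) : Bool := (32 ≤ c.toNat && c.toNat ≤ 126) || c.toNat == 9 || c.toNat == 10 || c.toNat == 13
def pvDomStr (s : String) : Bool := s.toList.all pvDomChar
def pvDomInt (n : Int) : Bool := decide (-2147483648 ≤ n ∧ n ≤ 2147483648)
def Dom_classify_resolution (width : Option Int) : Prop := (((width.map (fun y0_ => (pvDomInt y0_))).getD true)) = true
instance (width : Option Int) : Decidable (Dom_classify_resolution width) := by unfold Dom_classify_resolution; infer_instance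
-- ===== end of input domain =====

-- B replaces A's sort-then-descending-scan over the tier dict with a bisect_right binary search over an ascending threshold table (alternative algorithm).


-- ===== PORT A =====
-- module constant RESOLUTION_TIERS (dict as association list in insertion order)
def resolutionTiers : List (String × Int) := [("SD", 0), ("720p", 1280), ("1080p", 1920), ("4K", 3840)]

-- the for-loop over the sorted items, returning the first tier with width >= min_width
def loopA : List (String × Int) → Int → Option String
  | [], _ => none
  | (tier, min_width) :: rest, w => if w ≥ min_width then some tier else loopA rest w

def classify_resolution (width : Option Int) : String :=
  match width with
  | none => "Unknown"
  | some w =>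
    if w = 0 then "Unknown"   -- 'if not width' (0 is falsy)
    else
      match loopA (PySem.List.sorted resolutionTiers (fun x => x.2) true) w with
      | some tier => tier
      | none => "SD"

-- ===== PORT B =====
-- module constants of Source B
def bThresholds : List Int := [1280, 1920, 3840]
def bNames : List String := ["SD", "720p", "1080p", "4K"]

-- the while-loop of bisect_right; fuel = hi - lo bounds the iterations (loop halves the interval)
def bisectLoop (x : Int) : Nat → Nat → Nat → Nat
  | 0, lo, _ => lo
  | fuel + 1, lo, hi =>
    if lo < hi then
      let mid := (lo + hi) / 2
      if x < bThresholds.getD mid 0 then bisectLoop x fuel lo mid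
      else bisectLoop x fuel (mid + 1) hi
    else lo

def classify_resolution_alt (width : Option Int) : String :=
  match width with
  | none => "Unknown"
  | some w =>
    if w = 0 then "Unknown"
    else bNames.getD (bisectLoop w bThresholds.length 0 bThresholds.length) ""

-- ===== PRECONDITION & SPEC =====
def Spec_classify_resolution (width : Option Int) (out : String) : Prop := out = classify_resolution_alt width
instance (width : Option Int) (out : String) : Decidable (Spec_classify_resolution width out) := by unfold Spec_classify_resolution; infer_instance

-- ===== CLAIM (what is proved, stated in full; the proofs are below) =====
def Claim_equal_classify_resolution : Prop := ∀ (width : Option Int), Dom_classify_resolution width → Spec_classify_resolution width (classify_resolution width)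

-- ===== LEMMAS AND PROOFS =====
theorem sorted_tiers_eq : PySem.List.sorted resolutionTiers (fun x => x.2) true
    = [("4K", 3840), ("1080p", 1920), ("720p", 1280), ("SD", 0)] := by decide

-- ===== VERDICT (by name: the statement is the Claim_ definition above) =====
theorem classify_resolution_spec : Claim_equal_classify_resolution := by
  intro width _
  unfold Spec_classify_resolution classify_resolution classify_resolution_alt
  cases width with
  | none => rfl
  | some w =>
    simp only [sorted_tiers_eq, loopA, bThresholds, bNames, bisectLoop, List.length,
      List.getD]
    split_ifs <;> simp_all <;> omega
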